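-- pv_equiv track=rewrite | github.com/necla-ml/ML-Vision | ml/vision/datasets/flickr.py | lastTokenIndex
-- ===== SOURCE A (Python) =====
-- def lastTokenIndex(arr, sub):
--     """Return the index of the last token in the sublist
--
--     Args:
--         arr: list of tokens
--         sub: list of phrase tokens
--     """
--
--     sublen = len(sub)
--     first = sub[0]
--     indx = -1
--     while True:
--         try:
--             indx = arr.index(first, indx + 1)
--         except ValueError:
--             break
--         if sub == arr[indx : indx + sublen]:
--             return indx + sublen - 1
--
--     return -1
-- ===== SOURCE B (Python) =====
-- def lastTokenIndex(arr, sub):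
--     """Return the index of the last token in the sublist
--
--     Rabin-Karp: rolling hash over windows, slice compared only on hash hit.
--     """
--     m = len(sub)
--     n = len(arr)
--     if m > n:
--         return -1
--     MOD = 1000000007
--     BASE = 1 << 31
--     hs = 0
--     for x in sub:
--         hs = (hs * BASE + x) % MOD
--     h = 0
--     for x in arr[:m]:
--         h = (h * BASE + x) % MOD
--     power = pow(BASE, m - 1, MOD) if m >= 1 else 0
--     i = 0
--     while True:
--         if h == hs and arr[i:i + m] == sub:
--             return i + m - 1
--         if i + m >= n:
--             return -1
--         h = ((h - arr[i] * power) * BASE + arr[i + m]) % MOD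
--         i += 1
-- ===== Notes on version B (the rewrite author's own statement) =====
-- stated objective: alternative
-- what changed: Replaced A's arr.index-driven scan (jump to each occurrence of the first token, then compare the slice) by a Rabin-Karp rolling hash that compares the slice only on a hash hit.
import Mathlib
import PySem

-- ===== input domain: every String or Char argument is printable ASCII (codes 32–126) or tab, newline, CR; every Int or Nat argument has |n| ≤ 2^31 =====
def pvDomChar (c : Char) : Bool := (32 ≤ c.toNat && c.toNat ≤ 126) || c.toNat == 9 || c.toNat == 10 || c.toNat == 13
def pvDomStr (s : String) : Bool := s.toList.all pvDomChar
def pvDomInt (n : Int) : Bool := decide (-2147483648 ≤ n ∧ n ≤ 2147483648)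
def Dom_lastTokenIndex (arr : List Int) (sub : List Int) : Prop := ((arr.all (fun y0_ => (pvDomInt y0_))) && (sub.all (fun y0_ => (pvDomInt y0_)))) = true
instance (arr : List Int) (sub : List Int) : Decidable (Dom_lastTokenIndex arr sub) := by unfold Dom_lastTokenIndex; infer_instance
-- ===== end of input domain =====

-- B replaces A's "jump between occurrences of the first token and compare a slice" loop (worst-case O(n·m))
-- by a Rabin–Karp rolling hash that compares the slice only on a hash hit; objective: alternative algorithm.

-- ===== PORT A =====

-- port of arr.index(x, s): first index ≥ s with arr[j] = x (none = ValueError); the counter is the absolute index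
def pvIdxAux (x : Int) : List Int → Nat → Option Nat
  | [], _ => none
  | a :: t, i => if a = x then some i else pvIdxAux x t (i + 1)

theorem pvIdxAux_some_bounds {x : Int} : ∀ {l : List Int} {s i : Nat},
    pvIdxAux x l s = some i → s ≤ i ∧ i < s + l.length := by
  intro l
  induction l with
  | nil => intro s i h; simp [pvIdxAux] at h
  | cons a t ih =>
      intro s i h
      simp only [pvIdxAux] at h
      split at h
      · cases h; simp only [List.length_cons]; omega
      · have := ih h; simp only [List.length_cons]; omega

-- the 'while True' loop of A; start = indx + 1 of the Python (the next search start)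
def pvALoop (arr sub : List Int) (first : Int) (sublen : Nat) (start : Nat) : Int :=
  match h : pvIdxAux first (arr.drop start) start with
  | none => -1
  | some i =>
      if sub = (arr.drop i).take sublen then (i : Int) + (sublen : Int) - 1
      else pvALoop arr sub first sublen (i + 1)
termination_by arr.length + 1 - start
decreasing_by
  have hb := pvIdxAux_some_bounds h
  have := List.length_drop (l := arr) (i := start)
  omega

def lastTokenIndex (arr : List Int) (sub : List Int) : Int :=
  match sub with
  | [] => -1   -- Python raises IndexError on sub[0]; excluded by Pre_
  | first :: _ => pvALoop arr sub first sub.length 0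

-- ===== PORT B =====

def pvMOD : Int := 1000000007
def pvBASE : Int := 2147483648   -- 1 << 31

-- h = (h * BASE + x) % MOD folded over the list
def pvHash (l : List Int) : Int :=
  l.foldl (fun h x => PySem.Int.mod (h * pvBASE + x) pvMOD) 0

-- the 'while True' loop of B (arr[i], arr[i+m] are in range whenever read: i + m < n)
def pvBLoop (arr sub : List Int) (m n : Nat) (hs power : Int) (i : Nat) (h : Int) : Int :=
  if h = hs ∧ (arr.drop i).take m = sub then (i : Int) + (m : Int) - 1
  else if n ≤ i + m then -1
  else pvBLoop arr sub m n hs power (i + 1)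
        (PySem.Int.mod ((h - arr.getD i 0 * power) * pvBASE + arr.getD (i + m) 0) pvMOD)
termination_by n - i
decreasing_by omega

def lastTokenIndex_alt (arr : List Int) (sub : List Int) : Int :=
  let m := sub.length
  let n := arr.length
  if n < m then -1
  else
    let hs := pvHash sub
    let h := pvHash (arr.take m)
    -- pow(BASE, m-1, MOD); Python's guard 'if m >= 1 else 0' ported as the same branch
    let power := if 1 ≤ m then PySem.Int.powMod pvBASE (m - 1) pvMOD else 0
    pvBLoop arr sub m n hs power 0 h

-- ===== PRECONDITION & SPEC =====
-- Pre_ excludes only sub = [], on which A raises IndexError at sub[0].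
def Pre_lastTokenIndex (arr : List Int) (sub : List Int) : Prop := sub ≠ []
instance (arr : List Int) (sub : List Int) : Decidable (Pre_lastTokenIndex arr sub) := by
  unfold Pre_lastTokenIndex; infer_instance

def pvWitness_lastTokenIndex : List Int × List Int := ([1, 2, 3, 2, 3], [2, 3])

def Spec_lastTokenIndex (arr : List Int) (sub : List Int) (out : Int) : Prop := out = lastTokenIndex_alt arr sub
instance (arr : List Int) (sub : List Int) (out : Int) : Decidable (Spec_lastTokenIndex arr sub out) := by unfold Spec_lastTokenIndex; infer_instance

-- ===== CLAIM (what is proved, stated in full; the proofs are below) =====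
def Claim_equal_lastTokenIndex : Prop := ∀ (arr : List Int) (sub : List Int), Dom_lastTokenIndex arr sub → Pre_lastTokenIndex arr sub → Spec_lastTokenIndex arr sub (lastTokenIndex arr sub)

-- ===== LEMMAS AND PROOFS =====

-- reference function: first i with arr[i:i+|sub|] = sub, returning i+|sub|-1, else -1
def pvNaive (arr sub : List Int) (i : Nat) : Int :=
  if arr.length < i + sub.length then -1
  else if (arr.drop i).take sub.length = sub then (i : Int) + (sub.length : Int) - 1
  else pvNaive arr sub (i + 1)
termination_by arr.length - i
decreasing_by
  rename_i h1 h2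
  have hs : sub ≠ [] := by
    intro he; subst he; simp at h2
  have : 1 ≤ sub.length := List.length_pos_iff.mpr hs
  omega

theorem pvNaive_stop {arr sub : List Int} {i : Nat} (h : arr.length < i + sub.length) :
    pvNaive arr sub i = -1 := by
  rw [pvNaive]; simp [h]

theorem pvNaive_hit {arr sub : List Int} {i : Nat} (hm : 1 ≤ sub.length)
    (h : (arr.drop i).take sub.length = sub) :
    pvNaive arr sub i = (i : Int) + (sub.length : Int) - 1 := by
  have hlen : arr.length ≥ i + sub.length := by
    have h2 : min sub.length (arr.length - i) = sub.length := by
      simpa using congrArg List.length h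
    rw [Nat.min_def] at h2
    split at h2 <;> omega
  rw [pvNaive]
  simp [h, Nat.not_lt.mpr hlen]

theorem pvNaive_step {arr sub : List Int} {i : Nat}
    (h : (arr.drop i).take sub.length ≠ sub) :
    pvNaive arr sub i = pvNaive arr sub (i + 1) := by
  rw [pvNaive]
  split
  · rename_i hl
    rw [pvNaive_stop (by omega)]
  · simp [h]

-- a match at i forces arr[i] = first (for sub = first :: rest)
theorem pv_match_head {arr : List Int} {first : Int} {rest : List Int} {i : Nat}
    (h : (arr.drop i).take (first :: rest).length = first :: rest) :
    i < arr.length ∧ arr.getD i 0 = first := by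
  have hlen : i + (first :: rest).length ≤ arr.length := by
    have h2 : min (first :: rest).length (arr.length - i) = (first :: rest).length := by
      simpa using congrArg List.length h
    rw [Nat.min_def] at h2
    split at h2 <;> simp only [List.length_cons] at * <;> omega
  have hi : i < arr.length := by simp only [List.length_cons] at hlen; omega
  rw [List.drop_eq_getElem_cons hi] at h
  simp only [List.length_cons, List.take_succ_cons, List.cons.injEq] at h
  refine ⟨hi, ?_⟩
  rw [List.getD_eq_getElem arr 0 hi]
  exact h.1

-- skipping positions j with arr[j] ≠ first does not change pvNaive (sub = first :: rest)
theorem pvNaive_skip {arr : List Int} {first : Int} {rest : List Int} :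
    ∀ (k s : Nat), (∀ j, s ≤ j → j < s + k → j < arr.length → arr.getD j 0 ≠ first) →
      pvNaive arr (first :: rest) s = pvNaive arr (first :: rest) (s + k) := by
  intro k
  induction k with
  | zero => intro s _; rfl
  | succ k ih =>
      intro s hno
      have hstep : pvNaive arr (first :: rest) s = pvNaive arr (first :: rest) (s + 1) := by
        apply pvNaive_step
        intro hm
        obtain ⟨hlt, hv⟩ := pv_match_head hm
        exact hno s le_rfl (by omega) hlt hv
      rw [hstep, ih (s + 1) (fun j h1 h2 h3 => hno j (by omega) (by omega) h3)]
      congr 1; omega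

-- characterization of pvIdxAux
theorem pvIdxAux_none {x : Int} : ∀ {l : List Int} {s : Nat},
    pvIdxAux x l s = none → x ∉ l := by
  intro l
  induction l with
  | nil => simp
  | cons a t ih =>
      intro s h
      simp only [pvIdxAux] at h
      split at h
      · cases h
      · rename_i hne
        simp only [List.mem_cons, not_or]
        exact ⟨fun he => hne he.symm, ih h⟩

theorem pvIdxAux_some {x : Int} : ∀ {l : List Int} {s i : Nat},
    pvIdxAux x l s = some i →
      s ≤ i ∧ i - s < l.length ∧ l.getD (i - s) 0 = x ∧
        (∀ j, j < i - s → l.getD j 0 ≠ x) := by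
  intro l
  induction l with
  | nil => intro s i h; simp [pvIdxAux] at h
  | cons a t ih =>
      intro s i h
      simp only [pvIdxAux] at h
      split at h
      · rename_i heq
        cases h
        refine ⟨le_rfl, by simp, by simpa using heq, by omega⟩
      · rename_i hne
        obtain ⟨h1, h2, h3, h4⟩ := ih h
        have hig : s + 1 ≤ i := h1
        refine ⟨by omega, by simp; omega, ?_, ?_⟩
        · have : i - s = (i - (s + 1)) + 1 := by omega
          rw [this]; simpa using h3
        · intro j hj
          cases j with
          | zero => simpa using fun he => hne he
          | succ j =>
              have : j < i - (s + 1) := by omega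
              simpa using h4 j this

-- pvIdxAux on a drop: relate getD of the drop to getD of arr
theorem pv_getD_drop (arr : List Int) (s j : Nat) :
    (arr.drop s).getD j 0 = arr.getD (s + j) 0 := by
  simp [List.getD_eq_getElem?_getD, List.getElem?_drop]

-- ===== A = naive =====
theorem pvALoop_eq_naive (arr : List Int) (first : Int) (rest : List Int) :
    ∀ (fuel s : Nat), arr.length + 1 - s ≤ fuel →
      pvALoop arr (first :: rest) first (first :: rest).length s =
        pvNaive arr (first :: rest) s := by
  intro fuel
  induction fuel with
  | zero =>
      intro s hs
      -- s > arr.length: index search fails, both sides -1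
      have hs' : arr.length < s := by omega
      rw [pvALoop]
      have hd : arr.drop s = [] := List.drop_eq_nil_of_le (by omega)
      rw [hd]
      simp only [pvIdxAux]
      exact (pvNaive_stop (by simp; omega)).symm
  | succ fuel ih =>
      intro s hs
      rw [pvALoop]
      cases hidx : pvIdxAux first (arr.drop s) s with
      | none =>
          have hno : ∀ j, s ≤ j → j < arr.length → arr.getD j 0 ≠ first := by
            intro j hj hjl hgd
            have hrel : j - s < (arr.drop s).length := by
              simp only [List.length_drop]; omega
            have hidxeq : (arr.drop s)[j - s] = arr[j] := by
              rw [List.getElem_drop]; congr 1; omega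
            have hv : arr[j] = first := by
              rw [← hgd]
              simp [List.getD_eq_getElem?_getD, List.getElem?_eq_getElem hjl]
            have hmem : (arr.drop s)[j - s] ∈ arr.drop s := List.getElem_mem hrel
            rw [hidxeq, hv] at hmem
            exact pvIdxAux_none hidx hmem
          have hskip := pvNaive_skip (arr := arr) (first := first) (rest := rest)
            (arr.length + 1 - s) s (fun j h1 _ h3 => hno j h1 h3)
          rw [hskip]
          exact (pvNaive_stop (by simp only [List.length_cons]; omega)).symm
      | some i =>
          obtain ⟨h1, h2, h3, h4⟩ := pvIdxAux_some hidx
          have hlen := List.length_drop (l := arr) (i := s)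
          have hi : i < arr.length := by omega
          have hskip : pvNaive arr (first :: rest) s = pvNaive arr (first :: rest) i := by
            have := pvNaive_skip (arr := arr) (first := first) (rest := rest) (i - s) s ?_
            · rw [this]; congr 1; omega
            · intro j hj1 hj2 _ hgd
              have : (arr.drop s).getD (j - s) 0 = arr.getD j 0 := by
                rw [pv_getD_drop]; congr 1; omega
              exact h4 (j - s) (by omega) (by rw [this]; exact hgd)
          simp only []
          split
          · rename_i hm
            rw [hskip, pvNaive_hit (by simp) hm.symm]
          · rename_i hm
            have hm' : (arr.drop i).take (first :: rest).length ≠ first :: rest :=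
              fun he => hm he.symm
            rw [hskip, pvNaive_step hm']
            exact ih (i + 1) (by omega)

-- ===== hash lemmas =====

def pvHraw (l : List Int) : Int := l.foldl (fun h x => h * pvBASE + x) 0

theorem pv_emod_step (h x : Int) :
    (h % pvMOD * pvBASE + x) % pvMOD = (h * pvBASE + x) % pvMOD := by
  conv_lhs => rw [Int.add_emod, Int.mul_emod, Int.emod_emod_of_dvd _ dvd_rfl,
    ← Int.mul_emod, ← Int.add_emod]

theorem pvHash_foldl : ∀ (l : List Int) (h : Int),
    l.foldl (fun h x => PySem.Int.mod (h * pvBASE + x) pvMOD) (h % pvMOD) =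
      (l.foldl (fun h x => h * pvBASE + x) h) % pvMOD := by
  intro l
  induction l with
  | nil => intro h; simp
  | cons a t ih =>
      intro h
      simp only [List.foldl_cons]
      rw [PySem.Int.mod_eq_emod_of_pos (by norm_num [pvMOD]), pv_emod_step, ih]

theorem pvHash_eq_Hraw (l : List Int) : pvHash l = pvHraw l % pvMOD := by
  have := pvHash_foldl l 0
  simpa [pvHash, pvHraw] using this

theorem pv_foldl_shift : ∀ (l : List Int) (h : Int),
    l.foldl (fun h x => h * pvBASE + x) h =
      h * pvBASE ^ l.length + l.foldl (fun h x => h * pvBASE + x) 0 := by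
  intro l
  induction l with
  | nil => intro h; simp
  | cons a t ih =>
      intro h
      simp only [List.foldl_cons, List.length_cons]
      rw [ih (h * pvBASE + a), ih (0 * pvBASE + a)]
      ring

theorem pvHraw_cons (a : Int) (t : List Int) :
    pvHraw (a :: t) = a * pvBASE ^ t.length + pvHraw t := by
  simp only [pvHraw, List.foldl_cons]
  rw [pv_foldl_shift t (0 * pvBASE + a)]
  ring

theorem pvHraw_append_singleton (t : List Int) (x : Int) :
    pvHraw (t ++ [x]) = pvHraw t * pvBASE + x := by
  simp [pvHraw, List.foldl_append]

-- the rolling-hash step is exact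
theorem pv_roll (a x h : Int) (t : List Int)
    (hh : h = pvHash (a :: t)) :
    PySem.Int.mod ((h - a * (pvBASE ^ t.length % pvMOD)) * pvBASE + x) pvMOD =
      pvHash (t ++ [x]) := by
  rw [PySem.Int.mod_eq_emod_of_pos (by norm_num [pvMOD])]
  rw [pvHash_eq_Hraw] at hh
  rw [pvHash_eq_Hraw, pvHraw_append_singleton]
  have hcong : ((h - a * (pvBASE ^ t.length % pvMOD)) * pvBASE + x) ≡
      ((pvHraw (a :: t) - a * pvBASE ^ t.length) * pvBASE + x) [ZMOD pvMOD] := by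
    apply Int.ModEq.add_right
    apply Int.ModEq.mul_right
    apply Int.ModEq.sub
    · rw [hh]; exact (Int.emod_emod_of_dvd _ dvd_rfl)
    · exact Int.ModEq.mul_left a (Int.emod_emod_of_dvd _ dvd_rfl)
  have : ((pvHraw (a :: t) - a * pvBASE ^ t.length) * pvBASE + x) =
      pvHraw t * pvBASE + x := by rw [pvHraw_cons]; ring
  rw [this] at hcong
  exact hcong

-- window decomposition: arr[i:i+m] = arr[i] :: arr[i+1 : i+m]  and the slide
theorem pv_window_cons {arr : List Int} {i m : Nat} (hi : i < arr.length) (hm : 1 ≤ m) :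
    (arr.drop i).take m = arr.getD i 0 :: (arr.drop (i + 1)).take (m - 1) := by
  cases m with
  | zero => omega
  | succ m =>
      rw [List.drop_eq_getElem_cons hi, List.take_succ_cons, List.getD_eq_getElem arr 0 hi,
        Nat.add_sub_cancel]

theorem pv_window_slide {arr : List Int} {i m : Nat} (hm : 1 ≤ m) (hlt : i + m < arr.length) :
    (arr.drop (i + 1)).take m = (arr.drop (i + 1)).take (m - 1) ++ [arr.getD (i + m) 0] := by
  have hm' : m = (m - 1) + 1 := by omega
  conv_lhs => rw [hm']
  rw [List.take_add_one]
  congr 1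
  rw [List.getElem?_drop]
  have harr : i + 1 + (m - 1) = i + m := by omega
  rw [harr, List.getElem?_eq_getElem hlt, List.getD_eq_getElem arr 0 hlt]
  rfl

-- ===== B = naive =====
theorem pvBLoop_eq_naive (arr sub : List Int) (hm : 1 ≤ sub.length) :
    ∀ (fuel i : Nat) (h : Int), arr.length - i ≤ fuel →
      i + sub.length ≤ arr.length →
      h = pvHash ((arr.drop i).take sub.length) →
      pvBLoop arr sub sub.length arr.length (pvHash sub)
        (PySem.Int.powMod pvBASE (sub.length - 1) pvMOD) i h =
        pvNaive arr sub i := by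
  intro fuel
  induction fuel with
  | zero => intro i h hf hb _; omega
  | succ fuel ih =>
      intro i h hf hb hh
      rw [pvBLoop]
      by_cases hmatch : (arr.drop i).take sub.length = sub
      · have hcond : h = pvHash sub ∧ (arr.drop i).take sub.length = sub :=
          ⟨by rw [hh, hmatch], hmatch⟩
        rw [if_pos hcond, pvNaive_hit hm hmatch]
      · have hcond : ¬ (h = pvHash sub ∧ (arr.drop i).take sub.length = sub) := by
          intro ⟨_, h2⟩; exact hmatch h2
        rw [if_neg hcond, pvNaive_step hmatch]
        by_cases hend : arr.length ≤ i + sub.length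
        · rw [if_pos hend]
          exact (pvNaive_stop (by omega)).symm
        · rw [if_neg hend]
          apply ih (i + 1) _ (by omega) (by omega)
          -- rolling-hash invariant
          have hi : i < arr.length := by omega
          have hwin := pv_window_cons (arr := arr) (i := i) (m := sub.length) hi hm
          have hlen1 : ((arr.drop (i + 1)).take (sub.length - 1)).length = sub.length - 1 := by
            simp [List.length_take, List.length_drop]; omega
          have hpm : PySem.Int.powMod pvBASE (sub.length - 1) pvMOD =
              pvBASE ^ ((arr.drop (i + 1)).take (sub.length - 1)).length % pvMOD := by
            rw [hlen1, PySem.Int.powMod, PySem.Int.mod_eq_emod_of_pos (by norm_num [pvMOD])]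
          rw [hpm]
          rw [pv_roll (arr.getD i 0) (arr.getD (i + sub.length) 0) h
            ((arr.drop (i + 1)).take (sub.length - 1)) (by rw [hh, hwin])]
          rw [← pv_window_slide hm (by omega)]

-- both tops equal pvNaive 0
theorem pvA_eq_naive (arr sub : List Int) (hs : sub ≠ []) :
    lastTokenIndex arr sub = pvNaive arr sub 0 := by
  cases sub with
  | nil => exact absurd rfl hs
  | cons first rest =>
      simp only [lastTokenIndex]
      exact pvALoop_eq_naive arr first rest (arr.length + 1) 0 (by omega)

theorem pvB_eq_naive (arr sub : List Int) (hs : sub ≠ []) :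
    lastTokenIndex_alt arr sub = pvNaive arr sub 0 := by
  have hm : 1 ≤ sub.length := List.length_pos_iff.mpr hs
  simp only [lastTokenIndex_alt]
  by_cases hn : arr.length < sub.length
  · rw [if_pos hn]
    exact (pvNaive_stop (by omega)).symm
  · rw [if_neg hn, if_pos hm]
    exact pvBLoop_eq_naive arr sub hm (arr.length + 1) 0 (pvHash (arr.take sub.length))
      (by omega) (by omega) (by simp)

-- ===== VERDICT (by name: the statement is the Claim_ definition above) =====
theorem lastTokenIndex_spec : Claim_equal_lastTokenIndex := by
  intro arr sub _ hpre
  unfold Spec_lastTokenIndex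
  rw [pvA_eq_naive arr sub hpre, pvB_eq_naive arr sub hpre]
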